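-- pv_equiv track=rewrite | github.com/pypi-data/pypi-mirror-357 | packages/valiotworkflows/valiotworkflows-1.4.0rc2-py3-none-any.whl/valiotworkflows/workflows/decorator/utils.py | is_scream_case
-- ===== SOURCE A (Python) =====
-- def is_scream_case(s: str) -> bool:
--     """Check if a string is in SCREAM_CASE format.
--
--     SCREAM_CASE means:
--     - All uppercase letters, numbers and underscores
--     - No consecutive underscores
--     - Does not start or end with an underscore
--     - Has at least one uppercase letter
--     """
--     if not s:
--         return False
--
--     # Check if starts or ends with underscore (quick check)
--     if s.startswith('_') or s.endswith('_'):
--         return False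
--
--     # Check for consecutive underscores (quick string check)
--     if '__' in s:
--         return False
--
--     # Check if contains only uppercase letters, numbers, and underscores
--     if not all(c.isupper() or c.isdigit() or c == '_' for c in s):
--         return False
--
--     # Check if has at least one uppercase letter
--     if not any(c.isupper() for c in s):
--         return False
--
--     return True
-- ===== SOURCE B (Python) =====
-- def is_scream_case(s: str) -> bool:
--     """Single pass: validate SCREAM_CASE while tracking previous char and an uppercase flag."""
--     if not s:
--         return False
--     if s[0] == '_' or s[-1] == '_':
--         return False
--     has_upper = False
--     prev = ''
--     for c in s:
--         if not (c.isupper() or c.isdigit() or c == '_'):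
--             return False
--         if c == '_' and prev == '_':
--             return False
--         if c.isupper():
--             has_upper = True
--         prev = c
--     return has_upper
-- ===== Notes on version B (the rewrite author's own statement) =====
-- stated objective: alternative
-- what changed: Replaced A's five sequential whole-string scans (startswith/endswith, double-underscore substring search, all(), any()) by a single left-to-right pass that tracks the previous character and a has_upper flag, returning False at the first violation.
import Mathlib
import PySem

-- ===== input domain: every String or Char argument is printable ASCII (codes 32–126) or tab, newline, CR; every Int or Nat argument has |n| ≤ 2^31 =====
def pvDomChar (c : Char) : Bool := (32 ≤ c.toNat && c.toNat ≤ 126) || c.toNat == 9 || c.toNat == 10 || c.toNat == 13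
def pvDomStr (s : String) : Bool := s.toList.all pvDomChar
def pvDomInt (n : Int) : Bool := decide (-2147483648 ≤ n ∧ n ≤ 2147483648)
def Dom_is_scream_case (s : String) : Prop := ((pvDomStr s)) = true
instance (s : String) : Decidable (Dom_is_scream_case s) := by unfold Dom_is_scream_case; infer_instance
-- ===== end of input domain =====

-- B merges A's five sequential scans into one stateful pass; objective: alternative single-pass decomposition.

-- ===== PORT A =====
def is_scream_case (s : String) : Bool :=
  if s.toList.isEmpty then false
  else if PySem.Str.startswith s "_" || PySem.Str.endswith s "_" then false
  else if PySem.Str.isIn "__" s then false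
  else if !(s.toList.all (fun c => PySem.Chars.isupper c || PySem.Chars.isdigit c || c == '_')) then false
  else if !(s.toList.any (fun c => PySem.Chars.isupper c)) then false
  else true

-- ===== PORT B =====
-- the single-pass loop of Source B: prev is the previously seen char (none before the first step)
def screamLoop : List Char → Option Char → Bool → Bool
  | [], _, hu => hu
  | c :: rest, prev, hu =>
    if !(PySem.Chars.isupper c || PySem.Chars.isdigit c || c == '_') then false
    else if c == '_' && prev == some '_' then false
    else screamLoop rest (some c) (hu || PySem.Chars.isupper c)

def is_scream_case_alt (s : String) : Bool :=
  if s.toList.isEmpty then false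
  else if PySem.Str.pyGet? s 0 == some '_' || PySem.Str.pyGet? s (-1) == some '_' then false
  else screamLoop s.toList none false

-- ===== PRECONDITION & SPEC =====
def Spec_is_scream_case (s : String) (out : Bool) : Prop := out = is_scream_case_alt s
instance (s : String) (out : Bool) : Decidable (Spec_is_scream_case s out) := by unfold Spec_is_scream_case; infer_instance

-- ===== CLAIM (what is proved, stated in full; the proofs are below) =====
def Claim_equal_is_scream_case : Prop := ∀ (s : String), Dom_is_scream_case s → Spec_is_scream_case s (is_scream_case s)

-- ===== LEMMAS AND PROOFS =====

-- adjacent-double-underscore predicate, threaded the way screamLoop threads prev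
def dblU : Option Char → List Char → Bool
  | _, [] => false
  | p, c :: r => (p == some '_' && c == '_') || dblU (some c) r

theorem loop_eq (l : List Char) (p : Option Char) (hu : Bool) :
    screamLoop l p hu =
      (l.all (fun c => PySem.Chars.isupper c || PySem.Chars.isdigit c || c == '_')
        && !(dblU p l) && (hu || l.any (fun c => PySem.Chars.isupper c))) := by
  induction l generalizing p hu with
  | nil => simp [screamLoop, dblU]
  | cons c r ih =>
    rw [show screamLoop (c :: r) p hu =
      (if !(PySem.Chars.isupper c || PySem.Chars.isdigit c || c == '_') then false
       else if c == '_' && p == some '_' then false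
       else screamLoop r (some c) (hu || PySem.Chars.isupper c)) from rfl]
    cases hv : (PySem.Chars.isupper c || PySem.Chars.isdigit c || c == '_') with
    | false => simp [dblU, hv]
    | true =>
      cases hd : (c == '_' && p == some '_') with
      | true =>
        have hc := (Bool.and_eq_true_iff.mp hd).1
        have hp := (Bool.and_eq_true_iff.mp hd).2
        simp [dblU, hc, hp]
      | false =>
        have hpc : (p == some '_' && c == '_') = false := by
          cases h1 : (c == '_') <;> cases h2 : (p == some '_') <;> simp_all
        have hv' : (c == '_' || (PySem.Chars.isdigit c || PySem.Chars.isupper c)) = true := by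
          cases h1 : (c == '_') <;> cases h2 : PySem.Chars.isdigit c <;>
            cases h3 : PySem.Chars.isupper c <;> simp_all
        simp [ih, dblU, hpc, hv', Bool.or_comm, Bool.or_left_comm, Bool.and_comm,
          Bool.and_left_comm]

theorem infix_iff_dblU (l : List Char) : (['_','_'] <:+: l) ↔ dblU none l = true := by
  induction l with
  | nil => simp [dblU]
  | cons c r ih =>
    cases r with
    | nil =>
      constructor
      · intro h
        have := h.sublist.length_le
        simp at this
      · intro h
        simp [dblU] at h
    | cons b r2 =>
      rw [List.infix_cons_iff]
      have hstep : dblU none (c :: b :: r2) = ((c == '_' && b == '_') || dblU none (b :: r2)) := by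
        simp [dblU]
      rw [hstep]
      constructor
      · rintro (h | h)
        · rcases h with ⟨t, ht⟩
          simp only [List.cons_append, List.cons.injEq] at ht
          obtain ⟨h1, h2, -⟩ := ht
          subst h1; subst h2; simp
        · simp [ih.mp h]
      · intro h
        rcases Bool.or_eq_true_iff.mp h with h | h
        · left
          have h1 : c = '_' := by simpa using (Bool.and_eq_true_iff.mp h).1
          have h2 : b = '_' := by simpa using (Bool.and_eq_true_iff.mp h).2
          exact ⟨r2, by simp [h1, h2]⟩
        · exact Or.inr (ih.mpr h)

theorem suffix_underscore_iff (l : List Char) : ['_'] <:+ l ↔ l.getLast? = some '_' := by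
  constructor
  · rintro ⟨t, rfl⟩; simp
  · intro h
    obtain ⟨t, rfl⟩ := List.getLast?_eq_some_iff.mp h
    exact ⟨t, rfl⟩

theorem pyGet?_neg_one (l : List Char) (h : l ≠ []) :
    PySem.List.pyGet? l (-1 : Int) = l.getLast? := by
  have hl : 0 < l.length := List.length_pos_iff.mpr h
  simp only [PySem.List.pyGet?, PySem.List.pyIdx?]
  rw [if_neg (by norm_num), if_pos (by omega : -(l.length : Int) ≤ -1)]
  have h2 : (- -(1 : Int)).toNat = 1 := by norm_num
  rw [h2, Option.bind_some, List.getLast?_eq_getElem?]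

-- ===== VERDICT (by name: the statement is the Claim_ definition above) =====
theorem is_scream_case_spec : Claim_equal_is_scream_case := by
  intro s _
  unfold Spec_is_scream_case is_scream_case is_scream_case_alt
  by_cases hnil : s.toList = []
  · simp [hnil]
  · obtain ⟨c, r, hl⟩ := List.exists_cons_of_ne_nil hnil
    have hsw : PySem.Str.startswith s "_" = (c == '_') := by
      rw [Bool.eq_iff_iff, PySem.Str.startswith_eq, PySem.Chars.startswith_iff, hl]
      rw [show ("_" : String).toList = ['_'] from rfl]
      constructor
      · intro hp
        obtain ⟨h1, -⟩ := List.cons_prefix_cons.mp hp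
        subst h1
        rfl
      · intro hc
        have hce : c = '_' := by simpa using hc
        subst hce
        exact List.cons_prefix_cons.mpr ⟨rfl, List.nil_prefix⟩
    have hew : PySem.Str.endswith s "_" = (s.toList.getLast? == some '_') := by
      rw [Bool.eq_iff_iff, PySem.Str.endswith_eq, PySem.Chars.endswith_iff]
      rw [show ("_" : String).toList = ['_'] from rfl, suffix_underscore_iff]
      simp
    have hin : PySem.Str.isIn "__" s = dblU none s.toList := by
      rw [Bool.eq_iff_iff, PySem.Str.isIn_eq, PySem.Chars.isIn_iff_infix]
      rw [show ("__" : String).toList = ['_','_'] from rfl]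
      exact infix_iff_dblU s.toList
    have hg0 : (PySem.Str.pyGet? s 0 == some '_') = (c == '_') := by
      simp only [PySem.Str.pyGet?_eq, PySem.Chars.pyGet?_eq_listPyGet?, hl]
      simp [PySem.List.pyGet?, PySem.List.pyIdx?]
    have hg1 : (PySem.Str.pyGet? s (-1) == some '_') = (s.toList.getLast? == some '_') := by
      simp only [PySem.Str.pyGet?_eq, PySem.Chars.pyGet?_eq_listPyGet?]
      rw [pyGet?_neg_one _ hnil]
    rw [hsw, hew, hin, hg0, hg1, loop_eq]
    rw [hl]
    simp only [List.isEmpty_cons, if_false, Bool.false_eq_true, Bool.false_or]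
    generalize (c == '_') = a1
    generalize ((c :: r).getLast? == some '_') = a2
    generalize dblU none (c :: r) = a3
    generalize ((c :: r).all fun c => PySem.Chars.isupper c || PySem.Chars.isdigit c || c == '_') = a4
    generalize ((c :: r).any fun c => PySem.Chars.isupper c) = a5
    cases a1 <;> cases a2 <;> cases a3 <;> cases a4 <;> cases a5 <;> simp
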